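-- pv_equiv track=rewrite | github.com/Jstuff36/InterviewPractice | AppAcademySkypeInterviewPractice/NearbyAZ.py | NearbyAZ
-- ===== SOURCE A (Python) =====
-- def NearbyAZ(test_string):
-- 	for i in range(len(test_string)):
-- 		if test_string[i] == 'a':
-- 			j = i + 1
-- 			while j < len(test_string) and j <= i + 3:
-- 				if test_string[j] == 'z':
-- 					return('true')
-- 				j += 1
-- 	return('false')
-- ===== SOURCE B (Python) =====
-- def NearbyAZ(test_string):
--     last_a = None
--     for j, c in enumerate(test_string):
--         if c == 'a':
--             last_a = j
--         elif c == 'z' and last_a is not None and j - last_a <= 3: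
--             return 'true'
--     return 'false'
-- ===== Notes on version B (the rewrite author's own statement) =====
-- stated objective: faster
-- what changed: Single left-to-right pass that remembers the index of the most recently seen letter a, with each letter z looking back at it, instead of a bounded forward window scan nested inside the loop for every occurrence of the letter a.
import Mathlib
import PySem

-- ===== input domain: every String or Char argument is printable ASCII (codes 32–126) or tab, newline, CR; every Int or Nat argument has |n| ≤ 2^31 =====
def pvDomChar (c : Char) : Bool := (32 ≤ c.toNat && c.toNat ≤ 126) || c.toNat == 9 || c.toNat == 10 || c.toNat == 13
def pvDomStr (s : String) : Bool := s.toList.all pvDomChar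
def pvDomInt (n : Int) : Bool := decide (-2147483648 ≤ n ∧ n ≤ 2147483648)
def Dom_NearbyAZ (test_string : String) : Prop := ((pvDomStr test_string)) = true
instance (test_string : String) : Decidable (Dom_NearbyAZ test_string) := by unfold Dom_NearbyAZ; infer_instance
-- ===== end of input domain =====

-- B replaces A's nested forward window scan per letter a by one pass remembering the last index of that letter (objective: faster, measured constant factor).

-- ===== PORT A =====
-- inner while loop: 'while j < len(s) and j <= i + 3: if s[j] == 'z': return true; j += 1'
def azInner (s : List Char) (i j : Nat) : Bool :=
  if _h : j < s.length ∧ j ≤ i + 3 then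
    if s.getD j ' ' = 'z' then true else azInner s i (j + 1)
  else false
termination_by i + 4 - j
decreasing_by omega

-- outer 'for i in range(len(s))' loop
def azOuter (s : List Char) (i : Nat) : Bool :=
  if _h : i < s.length then
    if s.getD i ' ' = 'a' then
      if azInner s i (i + 1) then true else azOuter s (i + 1)
    else azOuter s (i + 1)
  else false
termination_by s.length - i

def NearbyAZ (test_string : String) : String :=
  if azOuter test_string.toList 0 then "true" else "false"

-- ===== PORT B =====
-- single pass over 'enumerate(test_string)' carrying last_a : Option Nat
def bLoop : List Char → Nat → Option Nat → Bool
  | [], _, _ => false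
  | c :: rest, j, la =>
    if c = 'a' then bLoop rest (j + 1) (some j)
    else
      match la with
      | some i => if c = 'z' ∧ j - i ≤ 3 then true else bLoop rest (j + 1) la
      | none => bLoop rest (j + 1) la

def NearbyAZ_alt (test_string : String) : String :=
  if bLoop test_string.toList 0 none then "true" else "false"

-- ===== PRECONDITION & SPEC =====
def Spec_NearbyAZ (test_string : String) (out : String) : Prop := out = NearbyAZ_alt test_string
instance (test_string : String) (out : String) : Decidable (Spec_NearbyAZ test_string out) := by unfold Spec_NearbyAZ; infer_instance

-- ===== CLAIM (what is proved, stated in full; the proofs are below) =====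
def Claim_equal_NearbyAZ : Prop := ∀ (test_string : String), Dom_NearbyAZ test_string → Spec_NearbyAZ test_string (NearbyAZ test_string)

-- ===== LEMMAS AND PROOFS =====

theorem azInner_iff (s : List Char) (i j : Nat) :
    azInner s i j = true ↔ ∃ b, j ≤ b ∧ b ≤ i + 3 ∧ b < s.length ∧ s.getD b ' ' = 'z' := by
  induction j using azInner.induct s i with
  | case1 j h hz =>
      rw [azInner, dif_pos h, if_pos hz]
      exact ⟨fun _ => ⟨j, le_rfl, h.2, h.1, hz⟩, fun _ => rfl⟩
  | case2 j h hz ih =>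
      rw [azInner, dif_pos h, if_neg hz]
      rw [ih]
      constructor
      · rintro ⟨b, hb1, hb2, hb3, hb4⟩; exact ⟨b, by omega, hb2, hb3, hb4⟩
      · rintro ⟨b, hb1, hb2, hb3, hb4⟩
        refine ⟨b, ?_, hb2, hb3, hb4⟩
        rcases Nat.eq_or_lt_of_le hb1 with h' | h'
        · exact absurd (h' ▸ hb4) hz
        · omega
  | case3 j h =>
      rw [azInner, dif_neg h]
      simp only [Bool.false_eq_true, false_iff]
      rintro ⟨b, hb1, hb2, hb3, _⟩
      exact h ⟨by omega, by omega⟩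

theorem azOuter_iff (s : List Char) (i : Nat) :
    azOuter s i = true ↔ ∃ a b, i ≤ a ∧ a < b ∧ b ≤ a + 3 ∧ b < s.length ∧
      s.getD a ' ' = 'a' ∧ s.getD b ' ' = 'z' := by
  induction i using azOuter.induct s with
  | case1 i h ha hz =>
      rw [azOuter, dif_pos h, if_pos ha, if_pos hz]
      rw [azInner_iff] at hz
      obtain ⟨b, hb1, hb2, hb3, hb4⟩ := hz
      exact ⟨fun _ => ⟨i, b, le_rfl, by omega, hb2, hb3, ha, hb4⟩, fun _ => rfl⟩
  | case2 i h ha hz ih =>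
      rw [azOuter, dif_pos h, if_pos ha, if_neg (by simp [hz]), ih]
      rw [azInner_iff] at hz
      constructor
      · rintro ⟨a, b, h1, h2, h3, h4, h5, h6⟩; exact ⟨a, b, by omega, h2, h3, h4, h5, h6⟩
      · rintro ⟨a, b, h1, h2, h3, h4, h5, h6⟩
        rcases Nat.eq_or_lt_of_le h1 with h' | h'
        · subst h'
          exact absurd ⟨b, by omega, by omega, h4, h6⟩ hz
        · exact ⟨a, b, by omega, h2, h3, h4, h5, h6⟩
  | case3 i h ha ih =>
      rw [azOuter, dif_pos h, if_neg ha, ih]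
      constructor
      · rintro ⟨a, b, h1, h2, h3, h4, h5, h6⟩; exact ⟨a, b, by omega, h2, h3, h4, h5, h6⟩
      · rintro ⟨a, b, h1, h2, h3, h4, h5, h6⟩
        rcases Nat.eq_or_lt_of_le h1 with h' | h'
        · exact absurd (h' ▸ h5) ha
        · exact ⟨a, b, by omega, h2, h3, h4, h5, h6⟩
  | case4 i h =>
      rw [azOuter, dif_neg h]
      simp only [Bool.false_eq_true, false_iff]
      rintro ⟨a, b, h1, h2, h3, h4, _, _⟩
      exact h (by omega)

theorem bLoop_iff (l : List Char) (j : Nat) (la : Option Nat)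
    (hla : ∀ i, la = some i → i < j) :
    bLoop l j la = true ↔ ∃ k, k < l.length ∧ l.getD k ' ' = 'z' ∧
      ((∃ m, m < k ∧ l.getD m ' ' = 'a' ∧ k ≤ m + 3) ∨
       ((∀ m, m < k → l.getD m ' ' ≠ 'a') ∧ ∃ i, la = some i ∧ j + k ≤ i + 3)) := by
  induction l generalizing j la with
  | nil =>
      simp [bLoop]
  | cons c rest ih =>
      by_cases hc : c = 'a'
      · rw [show bLoop (c :: rest) j la = bLoop rest (j + 1) (some j) by simp [bLoop, hc], ih (j + 1) (some j) (by rintro i h; cases h; omega)]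
        constructor
        · rintro ⟨k, h1, h2, h3⟩
          refine ⟨k + 1, by simpa using h1, by simpa using h2, Or.inl ?_⟩
          rcases h3 with ⟨m, hm1, hm2, hm3⟩ | ⟨_, i, hi, hle⟩
          · exact ⟨m + 1, by omega, by simpa using hm2, by omega⟩
          · injection hi with hi; exact ⟨0, by omega, by simpa, by omega⟩
        · rintro ⟨k, h1, h2, h3⟩
          match k, h1 with
          | 0, _ => simp only [List.getD_cons_zero] at h2; rw [h2] at hc; exact absurd hc (by decide)
          | k + 1, h1 =>
            refine ⟨k, by simpa using h1, by simpa using h2, ?_⟩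
            rcases h3 with ⟨m, hm1, hm2, hm3⟩ | ⟨hno, _⟩
            · match m with
              | 0 =>
                -- the 'a' used is c itself: then k+1 ≤ 3, so if rest has an earlier 'a' it also
                -- works; otherwise fall back to la = some j
                by_cases hex : ∃ m', m' < k ∧ rest.getD m' ' ' = 'a'
                · obtain ⟨m', hm'1, hm'2⟩ := hex
                  exact Or.inl ⟨m', hm'1, hm'2, by omega⟩
                · push_neg at hex
                  exact Or.inr ⟨fun m hm => hex m hm, j, rfl, by omega⟩
              | m + 1 =>
                exact Or.inl ⟨m, by omega, by simpa using hm2, by omega⟩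
            · exact absurd (by simpa using hc) (hno 0 (by omega))
      · match la with
        | none =>
            rw [show bLoop (c :: rest) j none = bLoop rest (j + 1) none by simp [bLoop, hc],
              ih (j + 1) none (by simp)]
            constructor
            · rintro ⟨k, h1, h2, ⟨m, hm1, hm2, hm3⟩ | ⟨_, i, hi, _⟩⟩
              · exact ⟨k + 1, by simpa using h1, by simpa using h2,
                  Or.inl ⟨m + 1, by omega, by simpa using hm2, by omega⟩⟩
              · exact absurd hi (by simp)
            · rintro ⟨k, h1, h2, h3⟩
              match k, h1 with
              | 0, _ =>
                rcases h3 with ⟨m, hm1, _⟩ | ⟨_, i, hi, _⟩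
                · omega
                · exact absurd hi (by simp)
              | k + 1, h1 =>
                rcases h3 with ⟨m, hm1, hm2, hm3⟩ | ⟨_, i, hi, _⟩
                · match m with
                  | 0 => exact absurd (by simpa using hm2) (by simpa using hc)
                  | m + 1 =>
                    exact ⟨k, by simpa using h1, by simpa using h2,
                      Or.inl ⟨m, by omega, by simpa using hm2, by omega⟩⟩
                · exact absurd hi (by simp)
        | some i =>
            have hij : i < j := hla i rfl
            have step : bLoop (c :: rest) j (some i) =
                if c = 'z' ∧ j - i ≤ 3 then true else bLoop rest (j + 1) (some i) := by
              simp [bLoop, hc]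
            by_cases hz : c = 'z' ∧ j - i ≤ 3
            · rw [step, if_pos hz]
              refine ⟨fun _ => ⟨0, by simp, by simpa using hz.1,
                Or.inr ⟨fun m hm => by omega, i, rfl, by omega⟩⟩, fun _ => rfl⟩
            · rw [step, if_neg hz, ih (j + 1) (some i) (by rintro i' h'; injection h' with h'; omega)]
              constructor
              · rintro ⟨k, h1, h2, ⟨m, hm1, hm2, hm3⟩ | ⟨hno, i', hi', hle⟩⟩
                · exact ⟨k + 1, by simpa using h1, by simpa using h2,
                    Or.inl ⟨m + 1, by omega, by simpa using hm2, by omega⟩⟩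
                · injection hi' with hi'; subst hi'
                  refine ⟨k + 1, by simpa using h1, by simpa using h2, Or.inr ⟨?_, i, rfl, by omega⟩⟩
                  intro m hm
                  match m with
                  | 0 => simpa using hc
                  | m + 1 => exact fun h => hno m (by omega) (by simpa using h)
              · rintro ⟨k, h1, h2, h3⟩
                match k, h1 with
                | 0, _ =>
                  have hcz : c = 'z' := by simpa using h2
                  rcases h3 with ⟨m, hm1, _⟩ | ⟨_, i', hi', hle⟩
                  · omega
                  · injection hi' with hi'; subst hi'
                    exact absurd ⟨hcz, by omega⟩ hz
                | k + 1, h1 =>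
                  rcases h3 with ⟨m, hm1, hm2, hm3⟩ | ⟨hno, i', hi', hle⟩
                  · match m with
                    | 0 => exact absurd (by simpa using hm2) (by simpa using hc)
                    | m + 1 =>
                      exact ⟨k, by simpa using h1, by simpa using h2,
                        Or.inl ⟨m, by omega, by simpa using hm2, by omega⟩⟩
                  · injection hi' with hi'; subst hi'
                    exact ⟨k, by simpa using h1, by simpa using h2,
                      Or.inr ⟨fun m hm h => hno (m + 1) (by omega) (by simpa using h), i, rfl, by omega⟩⟩

theorem loops_agree (s : List Char) : azOuter s 0 = bLoop s 0 none := by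
  have hA := azOuter_iff s 0
  have hB := bLoop_iff s 0 none (by simp)
  rw [← Bool.coe_iff_coe, hA, hB]
  constructor
  · rintro ⟨a, b, _, h2, h3, h4, h5, h6⟩
    exact ⟨b, h4, h6, Or.inl ⟨a, h2, h5, by omega⟩⟩
  · rintro ⟨k, h1, h2, ⟨m, hm1, hm2, hm3⟩ | ⟨_, i, hi, _⟩⟩
    · exact ⟨m, k, by omega, hm1, by omega, h1, hm2, h2⟩
    · exact absurd hi (by simp)

-- ===== VERDICT (by name: the statement is the Claim_ definition above) =====
theorem NearbyAZ_spec : Claim_equal_NearbyAZ := by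
  intro s _
  unfold Spec_NearbyAZ NearbyAZ NearbyAZ_alt
  rw [loops_agree]
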